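-- pv_equiv track=rewrite | github.com/thorbenwiese/bachelorarbeit_wiese | TracePoint.py | count_indels_letters
-- ===== SOURCE A (Python) =====
-- def count_indels_letters(seq):
--
--   letter_count = 0
--   indel_count = 0
--
--   for i in range(0,len(seq)):
--     if seq[i].isalpha():
--       letter_count += 1
--     elif seq[i] == '-':
--       indel_count += 1
--
--   return [letter_count, indel_count]
-- ===== SOURCE B (Python) =====
-- def count_indels_letters(seq):
--   # Frequency table built in one pass; totals computed over the DISTINCT characters.
--   freq = {}
--   for ch in seq:
--     freq[ch] = freq.get(ch, 0) + 1
--   letters = sum(v for ch, v in freq.items() if ch.isalpha())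
--   return [letters, freq.get('-', 0)]
-- ===== Notes on version B (the rewrite author's own statement) =====
-- stated objective: idiomatic
-- what changed: Replaces the per-index counting loop by a frequency table built in one pass, with the letter total summed over the table's distinct keys and the dash count read from the table.
import Mathlib
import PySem

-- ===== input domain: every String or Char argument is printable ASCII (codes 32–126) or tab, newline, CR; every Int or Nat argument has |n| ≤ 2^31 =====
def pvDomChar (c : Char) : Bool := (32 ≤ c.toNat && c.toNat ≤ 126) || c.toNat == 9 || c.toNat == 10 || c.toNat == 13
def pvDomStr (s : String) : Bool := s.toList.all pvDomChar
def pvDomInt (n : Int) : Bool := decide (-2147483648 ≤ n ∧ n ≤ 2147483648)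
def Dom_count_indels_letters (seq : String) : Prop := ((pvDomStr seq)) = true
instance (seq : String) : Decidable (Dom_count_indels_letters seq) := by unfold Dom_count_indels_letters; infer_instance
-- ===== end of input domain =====

-- B replaces A's per-index counting loop by a frequency table (dict) built in one pass,
-- summing letters over the table's distinct keys; objective: idiomatic, same cost.

-- ===== PORT A =====
-- for i in range(0, len(seq)): if seq[i].isalpha(): letter += 1 elif seq[i] == '-': indel += 1
def count_indels_letters (seq : String) : List Int :=
  let r := (PySem.List.pyRange 0 (PySem.Str.len seq) 1).foldl
    (fun (acc : Int × Int) i =>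
      let c := PySem.List.pyGetD seq.toList i ' '   -- seq[i]; index always in range, default unreachable
      if PySem.Chars.isalpha c then (acc.1 + 1, acc.2)
      else if c = '-' then (acc.1, acc.2 + 1)
      else acc)
    (0, 0)
  [r.1, r.2]

-- ===== PORT B =====
-- freq = {}; for ch in seq: freq[ch] = freq.get(ch, 0) + 1
-- letters = sum(v for ch, v in freq.items() if ch.isalpha()); return [letters, freq.get('-', 0)]
def count_indels_letters_alt (seq : String) : List Int :=
  let freq := seq.toList.foldl
    (fun (d : PySem.Dict Char Int) ch => d.insert ch (d.getD ch 0 + 1)) PySem.Dict.empty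
  let letters := ((freq.items.filter (fun kv => PySem.Chars.isalpha kv.1)).map (·.2)).sum
  [letters, freq.getD '-' 0]

-- ===== PRECONDITION & SPEC =====
def Spec_count_indels_letters (seq : String) (out : List Int) : Prop := out = count_indels_letters_alt seq
instance (seq : String) (out : List Int) : Decidable (Spec_count_indels_letters seq out) := by unfold Spec_count_indels_letters; infer_instance

-- ===== CLAIM (what is proved, stated in full; the proofs are below) =====
def Claim_equal_count_indels_letters : Prop := ∀ (seq : String), Dom_count_indels_letters seq → Spec_count_indels_letters seq (count_indels_letters seq)

-- ===== LEMMAS AND PROOFS =====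

-- A's loop: accumulator invariant.
theorem pairFold_eq (cs : List Char) (a b : Int) :
    cs.foldl (fun (acc : Int × Int) c =>
        if PySem.Chars.isalpha c then (acc.1 + 1, acc.2)
        else if c = '-' then (acc.1, acc.2 + 1)
        else acc) (a, b)
      = (a + (cs.countP PySem.Chars.isalpha : Int), b + (cs.count '-' : Int)) := by
  induction cs generalizing a b with
  | nil => simp
  | cons c cs ih =>
    simp only [List.foldl_cons]
    by_cases h : PySem.Chars.isalpha c = true
    · rw [if_pos h, ih, List.countP_cons, List.count_cons, if_pos h,
          if_neg (fun hb => by rw [eq_of_beq hb] at h; exact absurd h (by decide))]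
      simp only [Prod.mk.injEq]
      constructor <;> push_cast <;> ring
    · by_cases hd : c = '-'
      · subst hd
        rw [if_neg h, if_pos rfl, ih, List.countP_cons, List.count_cons,
            if_neg h, if_pos (by simp)]
        simp only [Prod.mk.injEq]
        constructor <;> push_cast <;> ring
      · rw [if_neg h, if_neg hd, ih, List.countP_cons, List.count_cons,
          if_neg h, if_neg (fun hb => hd (eq_of_beq hb))]
        simp only [Prod.mk.injEq]
        constructor <;> push_cast <;> ring

-- sum over a nodup list of a function supported at one member
theorem sum_map_ite_single (s : List Char) (hs : s.Nodup) (c : Char) (hc : c ∈ s) (f : Char → Int) :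
    (s.map (fun k => if k = c then f k else 0)).sum = f c := by
  induction s with
  | nil => cases hc
  | cons a s ih =>
    rcases List.mem_cons.mp hc with rfl | hcs
    · have hnot : c ∉ s := (List.nodup_cons.mp hs).1
      have hz : (s.map (fun k => if k = c then f k else 0)).sum = 0 := by
        apply List.sum_eq_zero
        intro x hx
        rcases List.mem_map.mp hx with ⟨k, hk, rfl⟩
        have hkc : k ≠ c := fun h => hnot (h ▸ hk)
        simp [hkc]
      simp [hz]
    · have ha : a ≠ c := fun h => (List.nodup_cons.mp hs).1 (h ▸ hcs)
      simp [ha, ih (List.nodup_cons.mp hs).2 hcs]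

-- countP over cs as a sum over any nodup cover of cs's elements
theorem countP_eq_sum_over_keys (cs : List Char) (p : Char → Bool) (s : List Char)
    (hs : s.Nodup) (hmem : ∀ x ∈ cs, x ∈ s) :
    (s.map (fun k => if p k then (cs.count k : Int) else 0)).sum = (cs.countP p : Int) := by
  induction cs with
  | nil => simp
  | cons c cs ih =>
    have hc : c ∈ s := hmem c List.mem_cons_self
    have hmem' : ∀ x ∈ cs, x ∈ s := fun x hx => hmem x (List.mem_cons_of_mem _ hx)
    have hsplit : ∀ k, (if p k then (((c :: cs).count k : Nat) : Int) else 0)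
        = (if p k then (cs.count k : Int) else 0) + (if k = c then (if p k then 1 else 0) else 0) := by
      intro k
      by_cases hp : p k = true
      · rw [if_pos hp, if_pos hp, if_pos hp, List.count_cons]
        by_cases hk : k = c
        · rw [if_pos hk, if_pos (by simp [hk])]
          push_cast; ring
        · rw [if_neg hk, if_neg (fun hb => hk (eq_of_beq hb).symm)]
          push_cast; ring
      · rw [if_neg hp, if_neg hp, if_neg hp]
        simp
    calc (s.map (fun k => if p k then (((c :: cs).count k : Nat) : Int) else 0)).sum
        = (s.map (fun k => (if p k then (cs.count k : Int) else 0)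
            + (if k = c then (if p k then 1 else 0) else 0))).sum := by
          congr 1; exact List.map_congr_left (fun k _ => hsplit k)
      _ = (s.map (fun k => if p k then (cs.count k : Int) else 0)).sum
            + (s.map (fun k => if k = c then (if p k then 1 else 0) else 0)).sum := by
          rw [← List.sum_map_add]
      _ = (cs.countP p : Int) + (if p c then 1 else 0) := by
          rw [ih hmem', sum_map_ite_single s hs c hc]
      _ = ((c :: cs).countP p : Int) := by
          rw [List.countP_cons]
          by_cases hp : p c = true
          · rw [if_pos hp, if_pos hp]; push_cast; ring
          · rw [if_neg hp, if_neg hp]; push_cast; ring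

-- B's letter total over distinct keys equals A's countP
theorem letters_eq (cs : List Char) :
    ((((PySem.Set.ofList cs).filter (fun k => PySem.Chars.isalpha k)).map
        (fun k => (cs.count k : Int))).sum)
      = (cs.countP PySem.Chars.isalpha : Int) := by
  have h1 : (((PySem.Set.ofList cs).filter (fun k => PySem.Chars.isalpha k)).map
        (fun k => (cs.count k : Int))).sum
      = ((PySem.Set.ofList cs).map
          (fun k => if PySem.Chars.isalpha k then (cs.count k : Int) else 0)).sum := by
    induction (PySem.Set.ofList cs) with
    | nil => simp
    | cons a s ih => by_cases h : PySem.Chars.isalpha a = true <;> simp [h, ih]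
  rw [h1]
  exact countP_eq_sum_over_keys cs _ _ (PySem.Set.nodup_ofList cs)
    (fun x hx => (PySem.Set.mem_ofList _ _).mpr hx)

-- ===== VERDICT (by name: the statement is the Claim_ definition above) =====
theorem count_indels_letters_spec : Claim_equal_count_indels_letters := by
  intro seq _
  unfold Spec_count_indels_letters
  simp only [count_indels_letters, count_indels_letters_alt]
  rw [PySem.Dict.foldl_insert_getD_add_one_eq_counter]
  have hA : (PySem.List.pyRange 0 (PySem.Str.len seq) 1).foldl
      (fun (acc : Int × Int) i =>
        let c := PySem.List.pyGetD seq.toList i ' '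
        if PySem.Chars.isalpha c then (acc.1 + 1, acc.2)
        else if c = '-' then (acc.1, acc.2 + 1)
        else acc) (0, 0)
    = seq.toList.foldl
      (fun (acc : Int × Int) c =>
        if PySem.Chars.isalpha c then (acc.1 + 1, acc.2)
        else if c = '-' then (acc.1, acc.2 + 1)
        else acc) (0, 0) := by
    rw [PySem.Str.len_eq]
    exact PySem.List.foldl_pyRange_zero_pyGetD seq.toList ' '
      (fun acc c => if PySem.Chars.isalpha c then (acc.1 + 1, acc.2)
        else if c = '-' then (acc.1, acc.2 + 1) else acc) (0, 0)
  rw [hA, pairFold_eq]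
  rw [PySem.Dict.items_counter, PySem.Dict.getD_counter]
  rw [List.filter_map, List.map_map]
  have hL := letters_eq seq.toList
  simp only [Function.comp_def] at hL ⊢
  simp [hL]
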